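-- pv_equiv track=rewrite | github.com/pwwang/biopipen | bioprocs/bin/utils.py | subtractDict
-- ===== SOURCE A (Python) =====
-- def subtractDict(bigger, smaller, prefix = ''):
-- 	ret = bigger.copy()
-- 	for key, val in smaller.items():
-- 		if key not in ret:
-- 			continue
-- 		if isinstance(ret[key], dict) and isinstance(val, dict) and ret[key] != val:
-- 			ret[key] = subtractDict(ret[key], val, prefix + '  ')
-- 		elif ret[key] == val:
-- 			del ret[key]
-- 	return ret
-- ===== SOURCE B (Python) =====
-- def subtractDict(bigger, smaller, prefix=''):
--     # Build the result by filtering bigger's items: drop a key exactly when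
--     # smaller holds the same value for it. (Values here are ints, so the
--     # nested-dict recursion of the original can never fire.)
--     return {key: val for key, val in bigger.items() if smaller.get(key) != val}
-- ===== Notes on version B (the rewrite author's own statement) =====
-- stated objective: simpler
-- what changed: Instead of copying bigger and deleting keys while iterating over smaller, B builds the result in one dict comprehension driven by bigger's items, keeping a pair unless smaller maps the same key to the same value.
import Mathlib
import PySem

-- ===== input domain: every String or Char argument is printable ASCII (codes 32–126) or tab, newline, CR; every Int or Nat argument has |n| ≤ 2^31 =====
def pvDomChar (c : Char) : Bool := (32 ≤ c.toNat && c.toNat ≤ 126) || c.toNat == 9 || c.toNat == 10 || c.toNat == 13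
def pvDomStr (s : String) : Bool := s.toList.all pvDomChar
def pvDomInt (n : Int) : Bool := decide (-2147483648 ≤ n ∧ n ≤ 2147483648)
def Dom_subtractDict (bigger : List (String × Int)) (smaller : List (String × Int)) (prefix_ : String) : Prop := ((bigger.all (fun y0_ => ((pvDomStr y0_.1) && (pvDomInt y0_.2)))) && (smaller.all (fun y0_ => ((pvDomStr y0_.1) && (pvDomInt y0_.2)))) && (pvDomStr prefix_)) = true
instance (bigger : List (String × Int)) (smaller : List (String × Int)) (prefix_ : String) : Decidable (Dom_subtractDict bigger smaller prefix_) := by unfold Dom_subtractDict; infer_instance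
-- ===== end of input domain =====

-- B replaces A's copy-then-delete loop over `smaller` by a single filter over `bigger`'s
-- items (a dict comprehension), keeping a pair unless `smaller` maps the key to the same value.


-- ===== PORT A =====
-- ret = bigger.copy(); for key, val in smaller.items(): …
-- The values are Int (dict[str, int]), so the `isinstance(..., dict)` branch is statically
-- false and the recursive call (and prefix) are unreachable; only the `elif ret[key] == val: del`
-- branch remains.
def subtractDict (bigger : List (String × Int)) (smaller : List (String × Int)) (prefix_ : String) : List (String × Int) :=
  let ret :=
    (PySem.Dict.ofList smaller).items.foldl
      (fun ret kv =>
        match ret.get? kv.1 with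
        | none => ret                                   -- if key not in ret: continue
        | some cur => if cur == kv.2 then ret.erase kv.1 else ret)  -- elif ret[key] == val: del ret[key]
      (PySem.Dict.ofList bigger)
  ret.items

-- ===== PORT B =====
-- {key: val for key, val in bigger.items() if smaller.get(key) != val}
def subtractDict_alt (bigger : List (String × Int)) (smaller : List (String × Int)) (prefix_ : String) : List (String × Int) :=
  let sm := PySem.Dict.ofList smaller
  (PySem.Dict.ofList bigger).items.filter (fun kv => !(sm.get? kv.1 == some kv.2))

-- ===== PRECONDITION & SPEC =====
def Spec_subtractDict (bigger : List (String × Int)) (smaller : List (String × Int)) (prefix_ : String) (out : List (String × Int)) : Prop := out = subtractDict_alt bigger smaller prefix_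
instance (bigger : List (String × Int)) (smaller : List (String × Int)) (prefix_ : String) (out : List (String × Int)) : Decidable (Spec_subtractDict bigger smaller prefix_ out) := by unfold Spec_subtractDict; infer_instance

-- ===== CLAIM (what is proved, stated in full; the proofs are below) =====
def Claim_equal_subtractDict : Prop := ∀ (bigger : List (String × Int)) (smaller : List (String × Int)) (prefix_ : String), Dom_subtractDict bigger smaller prefix_ → Spec_subtractDict bigger smaller prefix_ (subtractDict bigger smaller prefix_)

-- ===== LEMMAS AND PROOFS =====

-- A's loop body, named for the proofs
def pvStep (d : PySem.Dict String Int) (kv : String × Int) : PySem.Dict String Int :=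
  match d.get? kv.1 with
  | none => d
  | some cur => if cur == kv.2 then d.erase kv.1 else d

theorem pvStep_keys_nodup (d : PySem.Dict String Int) (kv : String × Int)
    (h : d.keys.Nodup) : (pvStep d kv).keys.Nodup := by
  unfold pvStep
  cases hg : d.get? kv.1 with
  | none => exact h
  | some cur =>
    by_cases he : cur == kv.2
    · simp only [he, if_pos]
      have : (d.erase kv.1).keys.Sublist d.keys := by
        simp only [PySem.Dict.keys, PySem.Dict.erase]
        exact List.Sublist.map _ List.filter_sublist
      exact h.sublist this
    · simp only [he, Bool.false_eq_true, if_neg, not_false_iff]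
      exact h

theorem pvStep_items (d : PySem.Dict String Int) (kv : String × Int)
    (h : d.keys.Nodup) :
    (pvStep d kv).items = d.items.filter (fun p => !decide (p = kv)) := by
  unfold pvStep
  cases hg : d.get? kv.1 with
  | none =>
    symm
    apply List.filter_eq_self.2
    intro p hp
    have := PySem.Dict.get?_of_mem_items d (k := p.1) (v := p.2) (by simpa using hp) h
    simp only [Bool.not_eq_eq_eq_not, Bool.not_true, decide_eq_false_iff_not]
    intro hpe
    rw [hpe, hg] at this
    simp at this
  | some cur =>
    by_cases he : cur = kv.2
    · subst he
      simp only [beq_self_eq_true, if_pos]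
      simp only [PySem.Dict.erase]
      apply List.filter_congr
      intro p hp
      have hgp := PySem.Dict.get?_of_mem_items d (k := p.1) (v := p.2) (by simpa using hp) h
      by_cases hk : p.1 = kv.1
      · rw [hk] at hgp; rw [hg] at hgp
        have : p = kv := by
          have h2 : p.2 = kv.2 := by injection hgp.symm
          exact Prod.ext hk h2
        simp [this]
      · simp [hk, Prod.ext_iff]
    · have : (cur == kv.2) = false := by simp [he]
      simp only [this, if_neg, Bool.false_eq_true, not_false_iff]
      symm
      apply List.filter_eq_self.2
      intro p hp
      have hgp := PySem.Dict.get?_of_mem_items d (k := p.1) (v := p.2) (by simpa using hp) h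
      simp only [Bool.not_eq_eq_eq_not, Bool.not_true, decide_eq_false_iff_not]
      intro hpe
      subst hpe
      rw [hg] at hgp
      exact he (by injection hgp)

theorem pvFoldl_step (l : List (String × Int)) (d : PySem.Dict String Int)
    (h : d.keys.Nodup) :
    (l.foldl pvStep d).items = d.items.filter (fun p => !decide (p ∈ l)) := by
  induction l generalizing d with
  | nil => simp
  | cons x l ih =>
    rw [List.foldl_cons, ih (pvStep d x) (pvStep_keys_nodup d x h),
        pvStep_items d x h, List.filter_filter]
    apply List.filter_congr
    intro p _
    by_cases h1 : p = x <;> by_cases h2 : p ∈ l <;> simp [h1, h2]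

theorem subtractDict_spec : Claim_equal_subtractDict := by
  intro bigger smaller prefix_ _
  unfold Spec_subtractDict subtractDict subtractDict_alt
  have hb := PySem.Dict.nodup_keys_ofList (κ := String) (ν := Int) bigger
  have hs := PySem.Dict.nodup_keys_ofList (κ := String) (ν := Int) smaller
  show ((PySem.Dict.ofList smaller).items.foldl pvStep (PySem.Dict.ofList bigger)).items = _
  rw [pvFoldl_step _ _ hb]
  apply List.filter_congr
  intro p _
  have := PySem.Dict.get?_eq_some_iff_mem_items (PySem.Dict.ofList smaller) p.1 p.2 hs
  by_cases hm : p ∈ (PySem.Dict.ofList smaller).items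
  · simp [hm, this.2 hm]
  · have : (PySem.Dict.ofList smaller).get? p.1 ≠ some p.2 := fun hc => hm (this.1 hc)
    simp [hm, this]
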